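-- pv_equiv track=rewrite | github.com/pspealman/CVish | erisapfel.py | make_anchor_regions
-- ===== SOURCE A (Python) =====
-- def make_anchor_regions(nt_list, gap):
--     nt_list.sort()
--
--     region_dict = {}
--
--     new_region = True
--
--     for nt in nt_list:
--         if new_region:
--             region_number = len(region_dict)
--             region_dict[len(region_dict)] = {'start':nt, 'stop':0}
--             new_region = False
--
--         if nt + gap not in nt_list:
--             region_dict[region_number]['stop'] = nt
--             new_region = True
--
--     return(region_dict)
-- ===== SOURCE B (Python) =====
-- def make_anchor_regions(nt_list, gap):
--     nt_list.sort()
--     values = set(nt_list)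
--
--     # indices whose value ends a region: the next anchor (value + gap) is absent
--     stop_idx = [i for i, v in enumerate(nt_list) if v + gap not in values]
--     # each region starts at the list head or right after the previous stop
--     start_idx = [0] + [i + 1 for i in stop_idx]
--
--     region_dict = {k: {'start': nt_list[s], 'stop': nt_list[e]}
--                    for k, (s, e) in enumerate(zip(start_idx, stop_idx))}
--     if start_idx[-1] < len(nt_list):
--         # trailing region that never reaches a stop: it is still open
--         region_dict[len(stop_idx)] = {'start': nt_list[start_idx[-1]], 'stop': 0}
--     return region_dict
-- ===== Notes on version B (the rewrite author's own statement) =====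
-- stated objective: faster
-- what changed: Replaces A's stateful flag-driven loop (with an O(n) list-membership scan and in-place dict mutation per element) by index arithmetic: one comprehension collects the stop indices using a set, start indices are derived as 0 and stop+1, and the regions are built by zipping starts with stops.
import Mathlib
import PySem

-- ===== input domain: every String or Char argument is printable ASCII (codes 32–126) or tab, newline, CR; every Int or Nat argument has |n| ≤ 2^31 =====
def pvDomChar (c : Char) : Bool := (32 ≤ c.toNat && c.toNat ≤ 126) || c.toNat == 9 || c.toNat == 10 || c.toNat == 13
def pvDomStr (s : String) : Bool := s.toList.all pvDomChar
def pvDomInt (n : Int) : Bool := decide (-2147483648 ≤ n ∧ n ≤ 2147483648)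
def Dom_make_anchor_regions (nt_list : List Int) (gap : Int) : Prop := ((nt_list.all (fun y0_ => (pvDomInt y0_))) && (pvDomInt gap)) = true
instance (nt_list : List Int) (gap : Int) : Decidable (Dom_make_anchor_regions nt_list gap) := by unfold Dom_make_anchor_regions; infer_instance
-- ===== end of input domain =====

-- B replaces A's flag-driven loop (O(n) list-membership scan and in-place dict mutation per
-- element) by index arithmetic: stop indices collected with a set, start indices derived as
-- 0 and stop+1, regions built by zipping starts with stops; equivalence is about the RETURN
-- value (both Pythons sort nt_list in place).

-- ===== PORT A =====
-- loop body of A's `for nt in nt_list`; state = (region_dict, new_region, region_number);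
-- region_number starts as 0 (Python leaves it unbound; it is always assigned before first use)
def pvStepA (srt : List Int) (gap : Int)
    (st : PySem.Dict Int (PySem.Dict String Int) × Bool × Int) (nt : Int) :
    PySem.Dict Int (PySem.Dict String Int) × Bool × Int :=
  let st1 :=
    if st.2.1 then
      (st.1.insert (st.1.size : Int) (PySem.Dict.mk [("start", nt), ("stop", 0)]),
        false, (st.1.size : Int))
    else st
  if ¬ srt.contains (nt + gap) then
    -- region_dict[region_number]['stop'] = nt  (key region_number is always present here)
    (st1.1.modify st1.2.2 PySem.Dict.empty (fun d => d.insert "stop" nt), true, st1.2.2)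
  else st1

def make_anchor_regions (nt_list : List Int) (gap : Int) : List (Int × List (String × Int)) :=
  let srt := PySem.List.sorted nt_list (fun x => x) false
  let fin := srt.foldl (pvStepA srt gap) (PySem.Dict.empty, true, 0)
  fin.1.items.map (fun p => (p.1, p.2.items))

-- ===== PORT B =====
def make_anchor_regions_alt (nt_list : List Int) (gap : Int) : List (Int × List (String × Int)) :=
  let srt := PySem.List.sorted nt_list (fun x => x) false
  let values := PySem.Set.ofList srt
  -- stop_idx = [i for i, v in enumerate(nt_list) if v + gap not in values]
  let stop_idx := ((PySem.List.enumerate srt).filter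
      (fun p => !(values.contains (p.2 + gap)))).map (fun p => p.1)
  -- start_idx = [0] + [i + 1 for i in stop_idx]
  let start_idx := (0 : Int) :: stop_idx.map (fun i => i + 1)
  -- comprehension keys 0,1,… are fresh and sequential, so the dict IS this assoc list
  let region_dict := (PySem.List.enumerate (start_idx.zip stop_idx)).map
    (fun q => (q.1, [("start", PySem.List.pyGetD srt q.2.1 0),
                     ("stop", PySem.List.pyGetD srt q.2.2 0)]))
  if PySem.List.pyGetD start_idx (-1) 0 < (srt.length : Int) then
    region_dict ++ [((stop_idx.length : Int),
      [("start", PySem.List.pyGetD srt (PySem.List.pyGetD start_idx (-1) 0) 0), ("stop", 0)])]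
  else region_dict

-- ===== PRECONDITION & SPEC =====
def Spec_make_anchor_regions (nt_list : List Int) (gap : Int) (out : List (Int × List (String × Int))) : Prop := out = make_anchor_regions_alt nt_list gap
instance (nt_list : List Int) (gap : Int) (out : List (Int × List (String × Int))) : Decidable (Spec_make_anchor_regions nt_list gap out) := by unfold Spec_make_anchor_regions; infer_instance

-- ===== CLAIM (what is proved, stated in full; the proofs are below) =====
def Claim_equal_make_anchor_regions : Prop := ∀ (nt_list : List Int) (gap : Int), Dom_make_anchor_regions nt_list gap → Spec_make_anchor_regions nt_list gap (make_anchor_regions nt_list gap)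

-- ===== LEMMAS AND PROOFS =====

-- reference recursion: the (start, stop) pairs of the regions; the state is the start of the
-- currently open region (none = between regions); a trailing open region has stop 0
def pvPairs (full : List Int) (gap : Int) : List Int → Option Int → List (Int × Int)
  | [], none => []
  | [], some s => [(s, 0)]
  | v :: rest, st =>
      let s := st.getD v
      if full.contains (v + gap) then pvPairs full gap rest (some s)
      else (s, v) :: pvPairs full gap rest none

-- rendering of pairs as A's dict items (keys k, k+1, ...)
def pvRenderA (k : Int) : List (Int × Int) → List (Int × PySem.Dict String Int)
  | [] => []
  | (a, b) :: ps => (k, PySem.Dict.mk [("start", a), ("stop", b)]) :: pvRenderA (k + 1) ps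

theorem pvRenderA_length (ps : List (Int × Int)) (k : Int) : (pvRenderA k ps).length = ps.length := by
  induction ps generalizing k with
  | nil => rfl
  | cons p ps ih => cases p; simp [pvRenderA, ih]

theorem pvRenderA_find_none (ps : List (Int × Int)) (k j : Int) (h : k + ps.length ≤ j) :
    List.find? (fun p => p.1 == j) (pvRenderA k ps) = none := by
  induction ps generalizing k with
  | nil => rfl
  | cons p ps ih =>
      cases p
      have hk : (k == j) = false := by simp at h ⊢; omega
      simp only [pvRenderA, List.find?_cons, hk]
      apply ih
      simp at h ⊢; omega

theorem pvRenderA_map_id (ps : List (Int × Int)) (k j : Int) (h : k + ps.length ≤ j)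
    (w : PySem.Dict String Int) :
    (pvRenderA k ps).map (fun p => if p.1 == j then (j, w) else p) = pvRenderA k ps := by
  induction ps generalizing k with
  | nil => rfl
  | cons p ps ih =>
      cases p
      have hk : (k == j) = false := by simp at h ⊢; omega
      simp only [pvRenderA, List.map_cons, hk, Bool.false_eq_true, if_false]
      rw [ih]
      simp at h ⊢; omega

theorem pvRenderA_append (xs ys : List (Int × Int)) (k : Int) :
    pvRenderA k (xs ++ ys) = pvRenderA k xs ++ pvRenderA (k + xs.length) ys := by
  induction xs generalizing k with
  | nil => simp [pvRenderA]
  | cons p xs ih =>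
      cases p
      simp only [List.cons_append, pvRenderA, ih, List.length_cons]
      have : k + 1 + (xs.length : Int) = k + ((xs.length : Int) + 1) := by ring
      rw [this]
      push_cast
      ring_nf

-- the dict built from pvRenderA 0 done does not contain the key done.length
theorem pvDict_contains_fresh (done : List (Int × Int)) :
    (PySem.Dict.mk (pvRenderA 0 done)).contains ((done.length : Int)) = false := by
  have h := pvRenderA_find_none done 0 (done.length : Int) (by simp)
  simp [PySem.Dict.contains]
  intro a b hab
  have := List.find?_eq_none.mp h _ hab
  simpa using this

-- inserting the fresh key appends
theorem pvDict_insert_fresh (done : List (Int × Int)) (w : PySem.Dict String Int) :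
    ((PySem.Dict.mk (pvRenderA 0 done)).insert ((done.length : Int)) w).items
      = pvRenderA 0 done ++ [(((done.length : Int)), w)] := by
  exact PySem.Dict.items_insert_of_not_contains _ _ (pvDict_contains_fresh done)

-- getD at the last (open) key
theorem pvDict_getD_last (done : List (Int × Int)) (w dflt : PySem.Dict String Int) :
    (PySem.Dict.mk (pvRenderA 0 done ++ [(((done.length : Int)), w)])).getD ((done.length : Int)) dflt = w := by
  simp [PySem.Dict.getD, PySem.Dict.get?, List.find?_append,
    pvRenderA_find_none done 0 (done.length : Int) (by simp)]

-- writing back at the last (open) key rewrites only the last item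
theorem pvDict_insert_last (done : List (Int × Int)) (w w' : PySem.Dict String Int) :
    ((PySem.Dict.mk (pvRenderA 0 done ++ [(((done.length : Int)), w)])).insert
        ((done.length : Int)) w').items
      = pvRenderA 0 done ++ [(((done.length : Int)), w')] := by
  have hc : (PySem.Dict.mk (pvRenderA 0 done ++ [(((done.length : Int)), w)])).contains
      ((done.length : Int)) = true := by
    simp [PySem.Dict.contains]
  rw [PySem.Dict.items_insert_of_contains _ _ hc]
  simp only [List.map_append, pvRenderA_map_id done 0 (done.length : Int) (by simp) w']
  simp

-- the inner dict update {'start': s, 'stop': 0}['stop'] = v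
theorem pvInner_update (s v : Int) :
    ((PySem.Dict.mk [("start", s), ("stop", (0 : Int))]).insert "stop" v)
      = PySem.Dict.mk [("start", s), ("stop", v)] := by
  simp [PySem.Dict.insert, PySem.Dict.contains]

theorem pvStepA_closed (full : List Int) (gap : Int) (done : List (Int × Int)) (rn v : Int) :
    pvStepA full gap (PySem.Dict.mk (pvRenderA 0 done), true, rn) v
      = if full.contains (v + gap) then
          (PySem.Dict.mk (pvRenderA 0 done ++
              [((done.length : Int), PySem.Dict.mk [("start", v), ("stop", 0)])]),
            false, (done.length : Int))
        else (PySem.Dict.mk (pvRenderA 0 (done ++ [(v, v)])), true, (done.length : Int)) := by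
  have hL : (((PySem.Dict.mk (pvRenderA 0 done)).size : Nat) : Int) = (done.length : Int) := by
    simp [PySem.Dict.size, pvRenderA_length]
  unfold pvStepA
  simp only [if_true]
  rw [hL]
  have hins : (PySem.Dict.mk (pvRenderA 0 done)).insert ((done.length : Int))
        (PySem.Dict.mk [("start", v), ("stop", 0)])
      = PySem.Dict.mk (pvRenderA 0 done ++
          [((done.length : Int), PySem.Dict.mk [("start", v), ("stop", 0)])]) := by
    apply PySem.Dict.ext
    rw [pvDict_insert_fresh]
  rw [hins]
  by_cases hm : full.contains (v + gap)
  · rw [if_neg (by simpa using hm), if_pos (by simpa using hm)]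
  · rw [if_pos (by simpa using hm), if_neg (by simpa using hm)]
    have hmod : (PySem.Dict.mk (pvRenderA 0 done ++
          [((done.length : Int), PySem.Dict.mk [("start", v), ("stop", 0)])])).modify
            ((done.length : Int)) PySem.Dict.empty (fun d => d.insert "stop" v)
        = PySem.Dict.mk (pvRenderA 0 (done ++ [(v, v)])) := by
      unfold PySem.Dict.modify
      rw [pvDict_getD_last]
      simp only [pvInner_update]
      apply PySem.Dict.ext
      rw [pvDict_insert_last, pvRenderA_append]
      simp [pvRenderA]
    rw [hmod]

theorem pvStepA_open (full : List Int) (gap : Int) (done : List (Int × Int)) (s v : Int) :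
    pvStepA full gap
        (PySem.Dict.mk (pvRenderA 0 done ++
            [((done.length : Int), PySem.Dict.mk [("start", s), ("stop", 0)])]),
          false, (done.length : Int)) v
      = if full.contains (v + gap) then
          (PySem.Dict.mk (pvRenderA 0 done ++
              [((done.length : Int), PySem.Dict.mk [("start", s), ("stop", 0)])]),
            false, (done.length : Int))
        else (PySem.Dict.mk (pvRenderA 0 (done ++ [(s, v)])), true, (done.length : Int)) := by
  unfold pvStepA
  simp only [if_false, Bool.false_eq_true]
  by_cases hm : full.contains (v + gap)
  · rw [if_neg (by simpa using hm), if_pos (by simpa using hm)]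
  · rw [if_pos (by simpa using hm), if_neg (by simpa using hm)]
    have hmod : (PySem.Dict.mk (pvRenderA 0 done ++
          [((done.length : Int), PySem.Dict.mk [("start", s), ("stop", 0)])])).modify
            ((done.length : Int)) PySem.Dict.empty (fun d => d.insert "stop" v)
        = PySem.Dict.mk (pvRenderA 0 (done ++ [(s, v)])) := by
      unfold PySem.Dict.modify
      rw [pvDict_getD_last]
      simp only [pvInner_update]
      apply PySem.Dict.ext
      rw [pvDict_insert_last, pvRenderA_append]
      simp [pvRenderA]
    rw [hmod]

-- the A-loop invariant, both phases at once
theorem pvA_loop (full : List Int) (gap : Int) (rest : List Int) :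
    (∀ (done : List (Int × Int)) (rn : Int),
      (rest.foldl (pvStepA full gap) (PySem.Dict.mk (pvRenderA 0 done), true, rn)).1.items
        = pvRenderA 0 (done ++ pvPairs full gap rest none)) ∧
    (∀ (done : List (Int × Int)) (s : Int),
      (rest.foldl (pvStepA full gap)
          (PySem.Dict.mk (pvRenderA 0 done ++
              [((done.length : Int), PySem.Dict.mk [("start", s), ("stop", 0)])]),
            false, (done.length : Int))).1.items
        = pvRenderA 0 (done ++ pvPairs full gap rest (some s))) := by
  induction rest with
  | nil =>
      constructor
      · intro done rn; simp [pvPairs]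
      · intro done s
        simp only [List.foldl_nil, pvPairs]
        rw [pvRenderA_append]
        simp [pvRenderA]
  | cons v rest ih =>
      constructor
      · intro done rn
        simp only [List.foldl_cons]
        rw [pvStepA_closed full gap done rn v]
        by_cases hm : full.contains (v + gap)
        · rw [if_pos hm, ih.2 done v]
          have hm' : v + gap ∈ full := by simpa using hm
          simp [pvPairs, hm']
        · rw [if_neg hm, ih.1 (done ++ [(v, v)]) (done.length : Int)]
          have hm' : ¬ v + gap ∈ full := by simpa using hm
          simp [pvPairs, hm', List.append_assoc]
      · intro done s
        simp only [List.foldl_cons]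
        rw [pvStepA_open full gap done s v]
        by_cases hm : full.contains (v + gap)
        · rw [if_pos hm, ih.2 done s]
          have hm' : v + gap ∈ full := by simpa using hm
          simp [pvPairs, hm']
        · rw [if_neg hm, ih.1 (done ++ [(s, v)]) (done.length : Int)]
          have hm' : ¬ v + gap ∈ full := by simpa using hm
          simp [pvPairs, hm', List.append_assoc]

-- B side: the stop indices, as a recursion with an offset
def pvStops (full : List Int) (gap : Int) : List Int → Int → List Int
  | [], _ => []
  | v :: rest, n =>
      if full.contains (v + gap) then pvStops full gap rest (n + 1)
      else n :: pvStops full gap rest (n + 1)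

theorem pvStops_eq (full : List Int) (gap : Int) (l : List Int) (n : Int) :
    ((PySem.List.enumerate l n).filter
        (fun p => !((PySem.Set.ofList full).contains (p.2 + gap)))).map (fun p => p.1)
      = pvStops full gap l n := by
  induction l generalizing n with
  | nil => simp [pvStops]
  | cons v rest ih =>
      have h := ih (n + 1)
      simp [PySem.Set.contains, PySem.Set.mem_ofList] at h
      by_cases hmem : v + gap ∈ full
      · simp [PySem.List.enumerate_cons, pvStops, hmem, h]
      · simp [PySem.List.enumerate_cons, pvStops, hmem, h]

-- the index bridge: zipping starts with stops, plus the open tail, yields pvPairs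
theorem pvIdx (srt : List Int) (gap : Int) :
    ∀ (l : List Int) (n m : Nat), l = srt.drop n → m ≤ n → n ≤ srt.length →
    ((((m : Int) :: (pvStops srt gap l n).map (· + 1)).zip (pvStops srt gap l n)).map
        (fun p => (PySem.List.pyGetD srt p.1 0, PySem.List.pyGetD srt p.2 0)))
      ++ (if ((pvStops srt gap l n).map (· + 1)).getLastD (m : Int) < (srt.length : Int)
          then [(PySem.List.pyGetD srt (((pvStops srt gap l n).map (· + 1)).getLastD (m : Int)) 0, 0)]
          else [])
      = pvPairs srt gap l (if m = n then none else some (PySem.List.pyGetD srt (m : Int) 0)) := by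
  intro l
  induction l with
  | nil =>
      intro n m hl hmn hn
      have hn' : n = srt.length := by
        have := congrArg List.length hl
        simp at this; omega
      subst hn'
      by_cases hm : m = srt.length
      · subst hm; simp [pvStops, pvPairs]
      · have hml : m < srt.length := by omega
        simp [pvStops, pvPairs, hm, hml]
  | cons v rest ih =>
      intro n m hl hmn hn
      have hnlt : n < srt.length := by
        have := congrArg List.length hl
        simp at this; omega
      have hrest : rest = srt.drop (n + 1) := by
        have := congrArg (List.drop 1) hl
        simpa [List.drop_drop, Nat.add_comm] using this
      have hv : PySem.List.pyGetD srt (n : Int) 0 = v := by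
        have : srt[n]? = some v := by
          have := congrArg List.head? hl
          simpa [List.head?_drop] using this.symm
        simp [PySem.List.pyGetD_natCast, List.getD, this]
      by_cases hm : srt.contains (v + gap)
      · -- v continues the region: stops unchanged
        have hmem : v + gap ∈ srt := by simpa using hm
        have hstep := ih (n + 1) m hrest (by omega) (by omega)
        simp only [pvStops, hm, if_true, pvPairs]
        rw [show pvStops srt gap rest (↑n + 1) = pvStops srt gap rest (↑(n + 1) : Int) by push_cast; ring_nf]
        rw [hstep]
        have hmn1 : m ≠ n + 1 := by omega
        by_cases hme : m = n
        · subst hme; simp [hv]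
        · simp [hme, hmn1]
      · -- v closes the region at index n
        have hmem : ¬ v + gap ∈ srt := by simpa using hm
        have hstep := ih (n + 1) (n + 1) hrest (by omega) (by omega)
        simp only [pvStops, hm, if_false, Bool.false_eq_true, pvPairs]
        rw [show pvStops srt gap rest (↑n + 1) = pvStops srt gap rest (↑(n + 1) : Int) by push_cast; ring_nf]
        simp only [List.map_cons, List.zip_cons_cons, List.map_cons, List.getLastD_cons]
        rw [show ((n : Int) + 1) = ((n + 1 : Nat) : Int) by push_cast; ring]
        rw [List.cons_append, hstep]
        by_cases hme : m = n
        · subst hme; simp [hv]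
        · simp [hme, hv]

-- rendering pairs with plain list values and keys k, k+1, ...
def pvRender (k : Int) : List (Int × Int) → List (Int × List (String × Int))
  | [] => []
  | (a, b) :: ps => (k, [("start", a), ("stop", b)]) :: pvRender (k + 1) ps

theorem pvRenderA_items (ps : List (Int × Int)) (k : Int) :
    (pvRenderA k ps).map (fun p => (p.1, p.2.items)) = pvRender k ps := by
  induction ps generalizing k with
  | nil => rfl
  | cons p ps ih => cases p; simp [pvRenderA, pvRender, ih]

theorem pvRender_append (xs ys : List (Int × Int)) (k : Int) :
    pvRender k (xs ++ ys) = pvRender k xs ++ pvRender (k + xs.length) ys := by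
  induction xs generalizing k with
  | nil => simp [pvRender]
  | cons p xs ih =>
      cases p
      simp only [List.cons_append, pvRender, ih, List.length_cons]
      have : k + 1 + (xs.length : Int) = k + ((xs.length : Int) + 1) := by ring
      rw [this]
      push_cast
      ring_nf

-- B's dict comprehension renders the mapped zip pairs
theorem pvRender_enum (srt : List Int) (ps : List (Int × Int)) (k : Int) :
    (PySem.List.enumerate ps k).map
        (fun q => (q.1, [("start", PySem.List.pyGetD srt q.2.1 0),
                         ("stop", PySem.List.pyGetD srt q.2.2 0)]))
      = pvRender k (ps.map (fun p => (PySem.List.pyGetD srt p.1 0, PySem.List.pyGetD srt p.2 0))) := by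
  induction ps generalizing k with
  | nil => rfl
  | cons p ps ih => cases p; simp [PySem.List.enumerate_cons, pvRender, ih]

-- ===== VERDICT (by name: the statement is the Claim_ definition above) =====
theorem make_anchor_regions_spec : Claim_equal_make_anchor_regions := by
  intro nt_list gap _
  unfold Spec_make_anchor_regions make_anchor_regions make_anchor_regions_alt
  set srt := PySem.List.sorted nt_list (fun x => x) false with hsrt
  have hA : (srt.foldl (pvStepA srt gap) (PySem.Dict.empty, true, 0)).1.items
      = pvRenderA 0 (pvPairs srt gap srt none) := by
    have h := (pvA_loop srt gap srt).1 [] 0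
    simpa [pvRenderA, PySem.Dict.empty] using h
  simp only [hA, pvRenderA_items]
  -- B side
  rw [pvStops_eq srt gap srt 0]
  set si := pvStops srt gap srt 0 with hsi
  have hlast : PySem.List.pyGetD ((0 : Int) :: si.map (· + 1)) (-1) 0
      = (si.map (· + 1)).getLastD (0 : Int) := by
    rw [PySem.List.pyGetD_neg_one _ _ (by simp)]
    simp [List.getLast_eq_getLastD]
  have hbr := pvIdx srt gap srt 0 0 (by simp) (le_refl 0) (Nat.zero_le _)
  norm_num [← hsi] at hbr
  rw [pvRender_enum srt]
  rw [hlast]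
  have hzlen : (((0 : Int) :: si.map (· + 1)).zip si).length = si.length := by
    simp
  have hgl : (si.map (· + 1)).getLastD (0 : Int)
      = (Option.map (fun x => x + 1) si.getLast?).getD 0 := by
    simp [List.getLastD_eq_getLast?]
  rw [hgl]
  by_cases hc : (Option.map (fun x => x + 1) si.getLast?).getD 0 < (srt.length : Int)
  · rw [if_pos hc]
    rw [if_pos hc] at hbr
    rw [← hbr, pvRender_append]
    simp [pvRender, hzlen]
  · rw [if_neg hc]
    rw [if_neg hc] at hbr
    rw [← hbr]
    simp
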